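-- pv_equiv track=rewrite | github.com/Muttakee31/solved-interview-problems | codility/tap-equilibirum.py | solution
-- ===== SOURCE A (Python) =====
-- def solution(A):
--     # write your code in Python 3.6
--     l = len(A)
--     sum = [0 for i in range(l)]
--     rev_sum = [0 for i in range(l)]
--     sum[0] = A[0]
--     rev_sum[l-1] = A[l-1]
--     for i in range(1, len(A)):
--         sum[i] = sum[i-1] + A[i]
--
--     for i in range(l-2, -1, -1):
--         rev_sum[i] = rev_sum[i+1] + A[i]
--
--     min = float('inf')
--     for i in range(0, l-1):
--         x = abs(sum[i] - rev_sum[i+1])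
--         if x < min:
--             min = x
--
--     return min
-- ===== SOURCE B (Python) =====
-- def solution(A):
--     total = sum(A)
--     left = 0
--     best = float('inf')
--     for i in range(len(A) - 1):
--         left += A[i]
--         right = total - left
--         d = abs(left - right)
--         if d < best:
--             best = d
--     return best
-- ===== Notes on version B (the rewrite author's own statement) =====
-- stated objective: simpler
-- what changed: Replaced the two precomputed prefix/suffix arrays and three loops with a single pass keeping one running left sum and the total, computing the minimum on the fly (no array allocation).
-- outside the precondition, e.g. on solution([7]): A returns inf, B returns inf
import Mathlib
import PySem

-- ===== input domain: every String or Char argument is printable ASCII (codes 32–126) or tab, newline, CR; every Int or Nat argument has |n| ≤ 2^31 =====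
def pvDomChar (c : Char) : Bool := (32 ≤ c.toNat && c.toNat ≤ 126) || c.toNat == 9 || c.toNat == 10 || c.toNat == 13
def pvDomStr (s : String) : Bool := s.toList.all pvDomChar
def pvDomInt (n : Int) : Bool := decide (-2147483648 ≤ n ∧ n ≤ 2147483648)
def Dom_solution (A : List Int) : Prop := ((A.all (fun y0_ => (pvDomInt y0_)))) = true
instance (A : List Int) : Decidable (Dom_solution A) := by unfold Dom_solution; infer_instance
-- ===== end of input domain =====

-- B replaces A's two precomputed prefix/suffix arrays and three loops by a single pass with a
-- running left sum (simpler; return-value equivalence on lists of length ≥ 2).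

-- ===== PORT A =====
def solution (A : List Int) : Int :=
  let l : Int := (A.length : Int)
  let sum0 : List Int := (PySem.List.pyRange 0 l 1).map (fun _ => 0)
  let rev0 : List Int := (PySem.List.pyRange 0 l 1).map (fun _ => 0)
  let sum1 := sum0.set 0 (PySem.List.pyGetD A 0 0)
  let rev1 := rev0.set (l - 1).toNat (PySem.List.pyGetD A (l - 1) 0)
  let sums := (PySem.List.pyRange 1 l 1).foldl
      (fun s i => s.set i.toNat (PySem.List.pyGetD s (i - 1) 0 + PySem.List.pyGetD A i 0)) sum1
  let revs := (PySem.List.pyRange (l - 2) (-1) (-1)).foldl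
      (fun r i => r.set i.toNat (PySem.List.pyGetD r (i + 1) 0 + PySem.List.pyGetD A i 0)) rev1
  let m := (PySem.List.pyRange 0 (l - 1) 1).foldl
      (fun (m : Option Int) i =>
        let x := |PySem.List.pyGetD sums i 0 - PySem.List.pyGetD revs (i + 1) 0|
        match m with
        | none => some x
        | some mv => if x < mv then some x else some mv) none
  m.getD 0

-- ===== PORT B =====
def solution_alt (A : List Int) : Int :=
  let total := A.sum
  let st := (PySem.List.pyRange 0 ((A.length : Int) - 1) 1).foldl
      (fun (st : Int × Option Int) i =>
        let left := st.1 + PySem.List.pyGetD A i 0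
        let right := total - left
        let d := |left - right|
        let best := match st.2 with
          | none => some d
          | some b => if d < b then some d else some b
        (left, best))
      ((0 : Int), (none : Option Int))
  st.2.getD 0

-- ===== PRECONDITION & SPEC =====
-- Pre_ excludes the empty list, on which Python A raises IndexError, and one-element lists, on
-- which A returns float('inf') — a float, not a value of the declared Int return type.
def Pre_solution (A : List Int) : Prop := 2 ≤ A.length
instance (A : List Int) : Decidable (Pre_solution A) := by unfold Pre_solution; infer_instance
def pvWitness_solution : List Int := [3, 1, 2, 4, 3]
def Spec_solution (A : List Int) (out : Int) : Prop := out = solution_alt A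
instance (A : List Int) (out : Int) : Decidable (Spec_solution A out) := by unfold Spec_solution; infer_instance

-- ===== CLAIM (what is proved, stated in full; the proofs are below) =====
def Claim_equal_solution : Prop := ∀ (A : List Int), Dom_solution A → Pre_solution A → Spec_solution A (solution A)

-- ===== LEMMAS AND PROOFS =====

-- reading an index of a set list
theorem pvGetD_set (xs : List Int) (i j : Nat) (v : Int) :
    (xs.set i v).getD j 0 = if i = j ∧ j < xs.length then v else xs.getD j 0 := by
  unfold List.getD
  rw [List.getElem?_set]
  by_cases h1 : i = j <;> by_cases h2 : j < xs.length
  · simp [h1, h2]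
  · simp [h1, h2]
  · simp [h1, h2]
  · simp [h1, h2]

-- a constant-zero list reads 0 at every index
theorem pvZero_getD (xs : List Int) (j : Nat) :
    ((xs.map (fun _ => (0 : Int)))).getD j 0 = 0 := by
  unfold List.getD
  rw [List.map_const', List.getElem?_replicate]
  split_ifs <;> rfl

-- the minimum-tracking step both loops share
def pvMinStep (m : Option Int) (x : Int) : Option Int :=
  match m with
  | none => some x
  | some mv => if x < mv then some x else some mv

-- characterisation of A's prefix-sum array loop
theorem pvSums_char (A : List Int) (k : Nat)
    (hk : 1 ≤ k) (hk2 : k ≤ A.length) (s : List Int)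
    (hlen : s.length = A.length)
    (hs : ∀ j : Nat, j < A.length → s.getD j 0 = if j < k then (A.take (j+1)).sum else 0) :
    (((PySem.List.pyRange (k : Int) (A.length : Int) 1).foldl
      (fun s i => s.set i.toNat (PySem.List.pyGetD s (i - 1) 0 + PySem.List.pyGetD A i 0)) s).length = A.length) ∧
      ∀ j : Nat, j < A.length → ((PySem.List.pyRange (k : Int) (A.length : Int) 1).foldl
      (fun s i => s.set i.toNat (PySem.List.pyGetD s (i - 1) 0 + PySem.List.pyGetD A i 0)) s).getD j 0 = (A.take (j+1)).sum := by
  induction hd : A.length - k generalizing k s with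
  | zero =>
    have hkl : k = A.length := by omega
    rw [hkl, PySem.List.pyRange_one_eq_nil (le_refl _)]
    refine ⟨by simpa using hlen, fun j hj => ?_⟩
    simp only [List.foldl_nil]
    rw [hs j hj, if_pos (by omega)]
  | succ c ih =>
    have hkl : k < A.length := by omega
    rw [PySem.List.pyRange_one_cons (by exact_mod_cast hkl), List.foldl_cons]
    have hgs : PySem.List.pyGetD s ((k : Int) - 1) 0 = (A.take k).sum := by
      have h1 : ((k : Int) - 1) = ((k - 1 : Nat) : Int) := by omega
      rw [h1, PySem.List.pyGetD_natCast]
      have := hs (k-1) (by omega)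
      rw [if_pos (by omega)] at this
      rw [this, show (k - 1) + 1 = k from by omega]
    have hga : PySem.List.pyGetD A (k : Int) 0 = A[k] := by
      simp [PySem.List.pyGetD_natCast, List.getD, List.getElem?_eq_getElem hkl]
    have htake : (A.take (k+1)).sum = (A.take k).sum + A[k] := by
      rw [List.take_add_one, List.sum_append]
      simp [List.getElem?_eq_getElem hkl]
    have hcast : ((k : Int)).toNat = k := by omega
    rw [hgs, hga, hcast]
    have := ih (k+1) (by omega) (by omega)
      (s.set k ((A.take k).sum + A[k]))
      (by simp [hlen])
      (fun j hj => by
        rw [pvGetD_set, hlen]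
        by_cases hjk : j = k
        · subst hjk
          rw [if_pos ⟨rfl, hj⟩, if_pos (by omega), htake]
        · rw [if_neg (by tauto), hs j hj]
          by_cases h2 : j < k
          · rw [if_pos h2, if_pos (by omega)]
          · rw [if_neg h2, if_neg (by omega)])
      (by omega)
    rw [show ((k : Int) + 1) = ((k + 1 : Nat) : Int) by push_cast; ring]
    exact this

-- characterisation of A's suffix-sum array loop
theorem pvRevs_char (A : List Int) (n : Nat)
    (hn : (n : Int) ≤ (A.length : Int) - 1) (r : List Int)
    (hlen : r.length = A.length)
    (hr : ∀ j : Nat, j < A.length → r.getD j 0 = if n ≤ j then (A.drop j).sum else 0) :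
    (((PySem.List.pyRange ((n : Int) - 1) (-1) (-1)).foldl
      (fun r i => r.set i.toNat (PySem.List.pyGetD r (i + 1) 0 + PySem.List.pyGetD A i 0)) r).length = A.length) ∧
      ∀ j : Nat, j < A.length → ((PySem.List.pyRange ((n : Int) - 1) (-1) (-1)).foldl
      (fun r i => r.set i.toNat (PySem.List.pyGetD r (i + 1) 0 + PySem.List.pyGetD A i 0)) r).getD j 0 = (A.drop j).sum := by
  induction n generalizing r with
  | zero =>
    rw [show ((0 : Nat) : Int) - 1 = (-1 : Int) by norm_num,
        PySem.List.pyRange_neg_one_eq_nil (le_refl _)]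
    refine ⟨by simpa using hlen, fun j hj => ?_⟩
    simp only [List.foldl_nil]
    rw [hr j hj, if_pos (by omega)]
  | succ m ih =>
    rw [show ((m + 1 : Nat) : Int) - 1 = (m : Int) by push_cast; ring,
        PySem.List.pyRange_neg_one_cons (by omega), List.foldl_cons]
    have hm : m < A.length := by omega
    have hm1 : m + 1 < A.length := by omega
    have hgr : PySem.List.pyGetD r ((m : Int) + 1) 0 = (A.drop (m+1)).sum := by
      rw [show ((m : Int) + 1) = ((m + 1 : Nat) : Int) by push_cast; ring,
          PySem.List.pyGetD_natCast]
      have := hr (m+1) hm1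
      rw [if_pos (by omega)] at this
      exact this
    have hga : PySem.List.pyGetD A (m : Int) 0 = A[m] := by
      simp [PySem.List.pyGetD_natCast, List.getD, List.getElem?_eq_getElem hm]
    have hdrop : (A.drop m).sum = A[m] + (A.drop (m+1)).sum := by
      rw [List.drop_eq_getElem_cons hm, List.sum_cons]
    have hcast : ((m : Int)).toNat = m := by omega
    rw [hgr, hga, hcast, show ((m : Int)) - 1 = ((m : Nat) : Int) - 1 from rfl]
    exact ih (by omega) (r.set m ((A.drop (m+1)).sum + A[m])) (by simp [hlen])
      (fun j hj => by
        rw [pvGetD_set, hlen]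
        by_cases hjm : j = m
        · subst hjm
          rw [if_pos ⟨rfl, hj⟩, if_pos (le_refl _), hdrop]
          ring
        · rw [if_neg (by tauto), hr j hj]
          by_cases h2 : m + 1 ≤ j
          · rw [if_pos h2, if_pos (by omega)]
          · rw [if_neg h2, if_neg (by omega)])

-- characterisation of B's single pass
theorem pvAlt_char (A : List Int) (k : Nat) (hk : k ≤ A.length) :
    (PySem.List.pyRange 0 (k : Int) 1).foldl
      (fun (st : Int × Option Int) i =>
        let left := st.1 + PySem.List.pyGetD A i 0
        let right := A.sum - left
        let d := |left - right|
        let best := match st.2 with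
          | none => some d
          | some b => if d < b then some d else some b
        (left, best))
      ((0 : Int), (none : Option Int))
    = ((A.take k).sum,
       ((List.range k).map (fun j => |(A.take (j+1)).sum - (A.sum - (A.take (j+1)).sum)|)).foldl
         pvMinStep none) := by
  induction k with
  | zero => simp [PySem.List.pyRange_one_eq_nil]
  | succ n ih =>
    have hn : n ≤ A.length := by omega
    rw [show ((n+1 : Nat) : Int) = (n : Int) + 1 by push_cast; ring,
        PySem.List.pyRange_one_succ_right (by positivity),
        List.foldl_append, ih hn]
    have hlt : n < A.length := by omega
    have hget : PySem.List.pyGetD A (n : Int) 0 = A[n] := by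
      simp [PySem.List.pyGetD_natCast, List.getD, List.getElem?_eq_getElem hlt]
    have htake : (A.take (n+1)).sum = (A.take n).sum + A[n] := by
      rw [List.take_add_one, List.sum_append]
      simp [List.getElem?_eq_getElem hlt]
    simp only [List.foldl_cons, List.foldl_nil, List.range_succ, List.map_append,
      List.foldl_append, List.map_cons, List.map_nil, hget]
    rw [← htake]
    rfl

-- ===== VERDICT (by name: the statement is the Claim_ definition above) =====
theorem solution_spec : Claim_equal_solution := by
  intro A _ hpre
  unfold Pre_solution at hpre
  unfold Spec_solution solution solution_alt
  simp only []
  -- abbreviations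
  have hl1 : 1 ≤ A.length := by omega
  have hlz : ((A.length : Int)).toNat = A.length := by omega
  -- initial arrays
  have hzlen : ((PySem.List.pyRange 0 (A.length : Int) 1).map (fun _ => (0:Int))).length = A.length := by
    simp [PySem.List.length_pyRange_one]
  -- prefix array characterization
  have hA0 : PySem.List.pyGetD A (0 : Int) 0 = (A.take 1).sum := by
    have h0 : PySem.List.pyGetD A ((0:Nat) : Int) 0 = A.getD 0 0 := PySem.List.pyGetD_natCast A 0 0
    have h1 : (A.take 1).sum = A.getD 0 0 := by
      rw [show (1:Nat) = 0 + 1 from rfl, List.take_add_one]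
      simp [List.getD, List.getElem?_eq_getElem (show 0 < A.length by omega)]
    simpa [h1] using h0
  have hsums := pvSums_char A 1 (le_refl _) (by omega)
    (((PySem.List.pyRange 0 (A.length : Int) 1).map (fun _ => (0:Int))).set 0 (PySem.List.pyGetD A 0 0))
    (by simp [PySem.List.length_pyRange_one])
    (fun j hj => by
      rw [pvGetD_set, hzlen]
      by_cases hj0 : j = 0
      · subst hj0
        rw [if_pos ⟨rfl, hj⟩, if_pos (by omega), hA0]
      · rw [if_neg (by tauto), if_neg (by omega), pvZero_getD])
  simp only [Nat.cast_one] at hsums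
  obtain ⟨hsumlen, hsum⟩ := hsums
  -- suffix array characterization
  have hllast : (A.drop (A.length - 1)).sum = A.getD (A.length - 1) 0 := by
    have h : A.length - 1 < A.length := by omega
    rw [List.drop_eq_getElem_cons h, show A.length - 1 + 1 = A.length from by omega,
        List.drop_length, List.sum_cons, List.sum_nil, add_zero,
        List.getD, List.getElem?_eq_getElem h]
    rfl
  have hAl : PySem.List.pyGetD A ((A.length : Int) - 1) 0 = (A.drop (A.length - 1)).sum := by
    rw [show ((A.length : Int) - 1) = ((A.length - 1 : Nat) : Int) from by omega,
        PySem.List.pyGetD_natCast, hllast]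
  have hl1toNat : ((A.length : Int) - 1).toNat = A.length - 1 := by omega
  have hrevs := pvRevs_char A (A.length - 1) (by omega)
    (((PySem.List.pyRange 0 (A.length : Int) 1).map (fun _ => (0:Int))).set (((A.length : Int) - 1)).toNat (PySem.List.pyGetD A ((A.length : Int) - 1) 0))
    (by simp [PySem.List.length_pyRange_one])
    (fun j hj => by
      rw [pvGetD_set, hzlen, hl1toNat]
      by_cases hjl : j = A.length - 1
      · subst hjl
        rw [if_pos ⟨rfl, hj⟩, if_pos (le_refl _), hAl]
      · rw [if_neg (by tauto), if_neg (by omega), pvZero_getD])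
  rw [show (((A.length - 1 : Nat) : Int) - 1) = ((A.length : Int) - 2) from by omega] at hrevs
  obtain ⟨hrevlen, hrev⟩ := hrevs
  -- B side
  have hB := pvAlt_char A (A.length - 1) (by omega)
  rw [show (((A.length - 1 : Nat)) : Int) = (A.length : Int) - 1 from by omega] at hB
  rw [hB]
  -- A side: rewrite the tracked value inside the min loop
  rw [PySem.List.foldl_congr_mem _ _
    (fun (m : Option Int) (i : Int) =>
      pvMinStep m (|(A.take (i.toNat+1)).sum - (A.sum - (A.take (i.toNat+1)).sum)|)) _
    (fun m i hi => by
      rw [PySem.List.mem_pyRange_one] at hi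
      have hj : i.toNat < A.length - 1 := by omega
      have hieq : i = ((i.toNat : Nat) : Int) := by omega
      rw [hieq,
          show (((i.toNat : Nat) : Int) + 1) = ((i.toNat + 1 : Nat) : Int) from by push_cast; ring,
          PySem.List.pyGetD_natCast, PySem.List.pyGetD_natCast,
          hsum i.toNat (by omega), hrev (i.toNat + 1) (by omega),
          show (A.drop (i.toNat + 1)).sum = A.sum - (A.take (i.toNat + 1)).sum from by
            have := List.sum_take_add_sum_drop A (i.toNat + 1); omega]
      simp [pvMinStep, max_eq_left hi.1])]
  -- turn the Int range into a Nat range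
  rw [PySem.List.pyRange_one 0 ((A.length : Int) - 1), List.foldl_map,
      show ((A.length : Int) - 1 - 0).toNat = A.length - 1 from by omega]
  rw [PySem.List.foldl_congr_mem _ _
    (fun (m : Option Int) (k : Nat) =>
      pvMinStep m (|(A.take (k+1)).sum - (A.sum - (A.take (k+1)).sum)|)) _
    (fun m k hk => by
      rw [show ((0 : Int) + (k : Int)).toNat = k from by omega])]
  simp only [List.foldl_map]
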